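-- pv_equiv track=rewrite | github.com/tb-yasu/graphgen-cmdfs-transformer | util.py | compress_vertex_sequence
-- ===== SOURCE A (Python) =====
-- from typing import Dict, List
-- from typing import List, Tuple, Dict
--
-- def compress_vertex_sequence(subsequence: List[int]) -> List[int]:
--     compressed_subsequence = [subsequence[0]]
--     counter = 1
--     for i in range(1, len(subsequence)):
--         if subsequence[i-1] == subsequence[i]-1:
--             counter += 1
--         else:
--             compressed_subsequence.append(counter)
--             compressed_subsequence.append(subsequence[i])
--             counter = 1
--
--     if counter > 1:
--         compressed_subsequence.append(counter)
--
--     return compressed_subsequence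
-- ===== SOURCE B (Python) =====
-- def _runs(seq):
--     # group seq into (start, length) runs of consecutive +1 integers
--     runs = []
--     i = 0
--     n = len(seq)
--     while i < n:
--         x = seq[i]
--         j = i + 1
--         while j < n and seq[j] == x + (j - i):
--             j += 1
--         runs.append((x, j - i))
--         i = j
--     return runs
--
--
-- def compress_vertex_sequence(subsequence):
--     runs = _runs(subsequence)
--     result = [runs[0][0]]
--     for prev, cur in zip(runs, runs[1:]):
--         result.append(prev[1])
--         result.append(cur[0])
--     if runs[-1][1] > 1:
--         result.append(runs[-1][1])
--     return result
-- ===== Notes on version B (the rewrite author's own statement) =====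
-- stated objective: alternative
-- what changed: B first groups the sequence into (start, length) runs with a scan-ahead pass, then emits the compressed form in a second pass over adjacent run pairs, instead of A's single indexed loop with a running counter.
import Mathlib
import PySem

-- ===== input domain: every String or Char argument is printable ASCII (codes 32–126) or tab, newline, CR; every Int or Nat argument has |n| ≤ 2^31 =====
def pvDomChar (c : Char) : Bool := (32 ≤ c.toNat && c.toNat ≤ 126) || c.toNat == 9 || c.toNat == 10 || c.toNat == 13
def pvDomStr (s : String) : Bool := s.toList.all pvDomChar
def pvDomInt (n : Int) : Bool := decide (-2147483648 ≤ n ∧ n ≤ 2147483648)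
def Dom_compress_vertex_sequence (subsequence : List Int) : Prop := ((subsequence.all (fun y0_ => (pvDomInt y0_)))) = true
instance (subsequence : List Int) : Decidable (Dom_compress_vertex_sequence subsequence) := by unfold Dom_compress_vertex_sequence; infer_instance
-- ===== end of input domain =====

-- B re-decomposes A's single counting loop into a run-grouping pass plus an emission pass over
-- adjacent run pairs (objective: alternative, same cost). Both raise IndexError on the empty list
-- (excluded by Pre_).

-- ===== PORT A =====
-- the 'for i in range(1, len(subsequence))' loop: each step compares the previous element with the
-- current one, carrying the state (compressed_subsequence, counter)
def aLoop (compressed : List Int) (counter : Int) (prev : Int) : List Int → List Int × Int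
  | [] => (compressed, counter)
  | x :: rest =>
      if prev == x - 1 then aLoop compressed (counter + 1) x rest
      else aLoop (compressed ++ [counter, x]) 1 x rest

def compress_vertex_sequence (subsequence : List Int) : List Int :=
  match subsequence with
  | [] => []   -- subsequence[0] raises IndexError; excluded by Pre_
  | h :: t =>
    let st := aLoop [h] 1 h t
    if st.2 > 1 then st.1 ++ [st.2] else st.1

-- ===== PORT B =====
-- the inner 'while j < n and seq[j] == x + (j - i)' scan: how far the run starting at x extends into rest
def runExt (x : Int) : List Int → Nat
  | [] => 0
  | y :: t => if y == x + 1 then 1 + runExt (x + 1) t else 0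

-- _runs: the outer 'while i < n' loop, as recursion on the remaining suffix: groups into (start, length) runs
def bRuns : List Int → List (Int × Int)
  | [] => []
  | x :: rest =>
    let k := runExt x rest
    (x, (1 + k : Nat)) :: bRuns (rest.drop k)
  termination_by seq => seq.length
  decreasing_by
    simp only [List.length_cons]
    exact Nat.lt_succ_of_le (List.length_drop (l := rest) (i := runExt x rest) ▸ Nat.sub_le _ _)

-- the 'for prev, cur in zip(runs, runs[1:])' loop
def bZip : List (Int × Int) → List Int
  | a :: b :: t => a.2 :: b.1 :: bZip (b :: t)
  | _ => []

def compress_vertex_sequence_alt (subsequence : List Int) : List Int :=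
  match bRuns subsequence with
  | [] => []   -- runs[0] raises IndexError; excluded by Pre_
  | r :: rs =>
    let result := r.1 :: bZip (r :: rs)
    let last := (r :: rs).getLast (by simp)
    if last.2 > 1 then result ++ [last.2] else result

-- ===== PRECONDITION & SPEC =====
-- A raises IndexError (subsequence[0]) on the empty list
def Pre_compress_vertex_sequence (subsequence : List Int) : Prop := subsequence ≠ []
instance (subsequence : List Int) : Decidable (Pre_compress_vertex_sequence subsequence) := by
  unfold Pre_compress_vertex_sequence; infer_instance

def pvWitness_compress_vertex_sequence : List Int := [1, 2, 3, 7, 8, 2]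

def Spec_compress_vertex_sequence (subsequence : List Int) (out : List Int) : Prop := out = compress_vertex_sequence_alt subsequence
instance (subsequence : List Int) (out : List Int) : Decidable (Spec_compress_vertex_sequence subsequence out) := by unfold Spec_compress_vertex_sequence; infer_instance

-- ===== CLAIM (what is proved, stated in full; the proofs are below) =====
def Claim_equal_compress_vertex_sequence : Prop := ∀ (subsequence : List Int), Dom_compress_vertex_sequence subsequence → Pre_compress_vertex_sequence subsequence → Spec_compress_vertex_sequence subsequence (compress_vertex_sequence subsequence)

-- ===== LEMMAS AND PROOFS =====

-- the common emission form: 'counter' is the length of the still-open run, 'runs' the remaining runs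
def emit (counter : Int) : List (Int × Int) → List Int
  | [] => if counter > 1 then [counter] else []
  | (x, n) :: t => counter :: x :: emit n t

-- B's second pass equals 'emit' of the runs after the first
theorem bZip_emit (rs : List (Int × Int)) : ∀ (r : Int × Int),
    bZip (r :: rs) ++ (if ((r :: rs).getLast (by simp)).2 > 1
      then [((r :: rs).getLast (by simp)).2] else []) = emit r.2 rs := by
  induction rs with
  | nil => intro r; simp [bZip, emit]
  | cons b t ih =>
    intro r
    have hlast : ((r :: b :: t).getLast (by simp)) = ((b :: t).getLast (by simp)) := by
      simp [List.getLast]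
    rw [show bZip (r :: b :: t) = r.2 :: b.1 :: bZip (b :: t) from rfl, hlast]
    simp only [List.cons_append, emit]
    rw [ih b]

-- A's loop (with the trailing-counter fixup) equals 'emit' of the runs of the unseen tail
theorem aLoop_emit (rest : List Int) : ∀ (prev counter : Int) (cs : List Int),
    (let st := aLoop cs counter prev rest;
     if st.2 > 1 then st.1 ++ [st.2] else st.1)
      = cs ++ emit (counter + (runExt prev rest : Int)) (bRuns (rest.drop (runExt prev rest))) := by
  induction rest with
  | nil =>
    intro prev counter cs
    simp only [aLoop, runExt, List.drop_nil, bRuns, emit, Nat.cast_zero, Int.add_zero]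
    split <;> simp
  | cons y r ih =>
    intro prev counter cs
    by_cases h : prev = y - 1
    · have h' : y = prev + 1 := by omega
      have hext : runExt prev (y :: r) = 1 + runExt y r := by
        simp only [runExt]; rw [if_pos (by exact beq_iff_eq.mpr (by omega))]
        congr 1; rw [show prev + 1 = y from by omega]
      rw [hext]
      have hdrop : (y :: r).drop (1 + runExt y r) = r.drop (runExt y r) := by
        rw [Nat.add_comm]; simp [List.drop_succ_cons]
      rw [hdrop]
      have ha : aLoop cs counter prev (y :: r) = aLoop cs (counter + 1) y r := by
        simp only [aLoop]; rw [if_pos (beq_iff_eq.mpr h)]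
      simp only [ha]
      rw [ih y (counter + 1) cs]
      congr 2; push_cast; ring
    · have hext : runExt prev (y :: r) = 0 := by
        simp only [runExt]; rw [if_neg]; simp; omega
      rw [hext]
      simp only [Nat.cast_zero, Int.add_zero, List.drop_zero]
      have ha : aLoop cs counter prev (y :: r) = aLoop (cs ++ [counter, y]) 1 y r := by
        simp only [aLoop]; rw [if_neg (by simp; omega)]
      simp only [ha]
      rw [ih y 1 (cs ++ [counter, y])]
      rw [show bRuns (y :: r) = (y, ((1 + runExt y r : Nat) : Int)) :: bRuns (r.drop (runExt y r)) from by
        rw [bRuns]]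
      simp only [emit, List.append_assoc, List.cons_append, List.nil_append]
      congr 3

-- ===== VERDICT (by name: the statement is the Claim_ definition above) =====
theorem compress_vertex_sequence_spec : Claim_equal_compress_vertex_sequence := by
  intro subsequence _ hpre
  unfold Spec_compress_vertex_sequence
  match subsequence with
  | [] => exact absurd rfl hpre
  | h :: t =>
    rw [show compress_vertex_sequence (h :: t)
        = (let st := aLoop [h] 1 h t; if st.2 > 1 then st.1 ++ [st.2] else st.1) from rfl]
    rw [aLoop_emit t h 1 [h]]
    have hb : bRuns (h :: t) = (h, ((1 + runExt h t : Nat) : Int)) :: bRuns (t.drop (runExt h t)) := by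
      rw [bRuns]
    rw [show compress_vertex_sequence_alt (h :: t)
        = (match bRuns (h :: t) with
           | [] => []
           | r :: rs =>
             let result := r.1 :: bZip (r :: rs)
             let last := (r :: rs).getLast (by simp)
             if last.2 > 1 then result ++ [last.2] else result) from rfl, hb]
    simp only
    rw [show ∀ (a : Int) (l tl : List Int) (c : Prop) [Decidable c],
        (if c then (a :: l) ++ tl else a :: l) = a :: (l ++ if c then tl else []) from by
      intro a l tl c _; split <;> simp]
    rw [bZip_emit (bRuns (t.drop (runExt h t))) (h, ((1 + runExt h t : Nat) : Int))]
    simp only [List.cons_append, List.nil_append]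
    congr 2
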